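-- pv_equiv track=rewrite | github.com/Phuc-Ly-Hong/LastBotChess | resource/move_generator.py | knight_attack_mask
-- ===== SOURCE A (Python) =====
-- def knight_attack_mask(square):
--     rank, file = divmod(square, 8)
--     moves = [(-2, -1), (-1, -2), (-2, 1), (-1, 2), (1, -2), (2, -1), (1, 2), (2, 1)]
--     result = 0
--     for dr, df in moves:
--         r, f = rank + dr, file + df
--         if 0 <= r < 8 and 0 <= f < 8:
--             result |= 1 << (r * 8 + f)
--     return result
-- ===== SOURCE B (Python) =====
-- def knight_attack_mask(square):
--     rank, file = divmod(square, 8)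
--     return sum(1 << t for t in range(64)
--                if abs(t // 8 - rank) * abs(t % 8 - file) == 2)
-- ===== Notes on version B (the rewrite author's own statement) =====
-- stated objective: alternative
-- what changed: B scans the 64 destination squares once and selects those at knight distance via the |dr|*|df|==2 product test, instead of A's loop over eight (dr,df) offsets with coordinate bounds checks and OR accumulation.
import Mathlib
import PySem

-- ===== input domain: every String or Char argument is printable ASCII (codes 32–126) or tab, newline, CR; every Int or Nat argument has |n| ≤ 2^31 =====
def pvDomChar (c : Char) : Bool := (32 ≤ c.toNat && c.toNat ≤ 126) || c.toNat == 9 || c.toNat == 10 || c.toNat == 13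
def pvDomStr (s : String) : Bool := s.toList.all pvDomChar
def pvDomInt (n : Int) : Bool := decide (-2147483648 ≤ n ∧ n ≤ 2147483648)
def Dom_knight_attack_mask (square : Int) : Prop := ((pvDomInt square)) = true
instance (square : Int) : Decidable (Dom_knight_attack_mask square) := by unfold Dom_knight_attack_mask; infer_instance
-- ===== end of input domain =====

-- B replaces A's eight-offset loop with a single scan of the 64 board squares, selecting
-- those at knight distance via the |dr|*|df| == 2 product test (alternative algorithm, same cost).


-- ===== PORT A =====
def knight_attack_mask (square : Int) : Int :=
  let rank := PySem.Int.floordiv square 8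
  let file := PySem.Int.mod square 8
  let moves : List (Int × Int) :=
    [(-2, -1), (-1, -2), (-2, 1), (-1, 2), (1, -2), (2, -1), (1, 2), (2, 1)]
  moves.foldl (fun result m =>
      let r := rank + m.1
      let f := file + m.2
      if 0 ≤ r ∧ r < 8 ∧ 0 ≤ f ∧ f < 8 then
        PySem.Int.bor result ((1 : Int) <<< (r * 8 + f).toNat)
      else result) 0

-- ===== PORT B =====
def knight_attack_mask_alt (square : Int) : Int :=
  let rank := PySem.Int.floordiv square 8
  let file := PySem.Int.mod square 8
  (((PySem.List.pyRange 0 64 1).filter (fun t =>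
      (PySem.Int.floordiv t 8 - rank).natAbs * (PySem.Int.mod t 8 - file).natAbs == 2)).map
    (fun t => (1 : Int) <<< t.toNat)).sum

-- ===== PRECONDITION & SPEC =====
def Spec_knight_attack_mask (square : Int) (out : Int) : Prop := out = knight_attack_mask_alt square
instance (square : Int) (out : Int) : Decidable (Spec_knight_attack_mask square out) := by unfold Spec_knight_attack_mask; infer_instance

-- ===== CLAIM (what is proved, stated in full; the proofs are below) =====
def Claim_equal_knight_attack_mask : Prop := ∀ (square : Int), Dom_knight_attack_mask square → Spec_knight_attack_mask square (knight_attack_mask square)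

-- ===== LEMMAS AND PROOFS =====

-- A's loop leaves the accumulator unchanged when every offset misses the board vertically.
lemma foldl_moves_acc (rank file : Int) (hr : rank ≤ -3 ∨ 10 ≤ rank)
    (moves : List (Int × Int)) (hmv : ∀ m ∈ moves, -2 ≤ m.1 ∧ m.1 ≤ 2) (acc : Int) :
    moves.foldl (fun result m =>
      let r := rank + m.1
      let f := file + m.2
      if 0 ≤ r ∧ r < 8 ∧ 0 ≤ f ∧ f < 8 then
        PySem.Int.bor result ((1 : Int) <<< (r * 8 + f).toNat)
      else result) acc = acc := by
  induction moves generalizing acc with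
  | nil => rfl
  | cons m ms ih =>
      simp only [List.foldl_cons]
      have hm := hmv m (List.mem_cons_self ..)
      rw [if_neg (by omega)]
      exact ih (fun x hx => hmv x (List.mem_cons_of_mem _ hx)) acc

-- When the rank square//8 is outside [-2, 9], no knight offset can land on the board, so A returns 0.
lemma knight_attack_mask_zero_far (square : Int)
    (h : square < -16 ∨ 80 ≤ square) : knight_attack_mask square = 0 := by
  have hd : PySem.Int.floordiv square 8 = square / 8 :=
    PySem.Int.floordiv_eq_ediv_of_pos (by norm_num)
  unfold knight_attack_mask
  exact foldl_moves_acc (PySem.Int.floordiv square 8) (PySem.Int.mod square 8)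
    (by rw [hd]; omega) _ (by intro m hm; fin_cases hm <;> norm_num) 0

-- When the rank square//8 is outside [-2, 9], no board square passes the distance test, so B returns 0.
lemma knight_attack_mask_alt_zero_far (square : Int)
    (h : square < -16 ∨ 80 ≤ square) : knight_attack_mask_alt square = 0 := by
  have hd : PySem.Int.floordiv square 8 = square / 8 :=
    PySem.Int.floordiv_eq_ediv_of_pos (by norm_num)
  unfold knight_attack_mask_alt
  simp only [hd]
  have hfil : ((PySem.List.pyRange 0 64 1).filter (fun t =>
      (PySem.Int.floordiv t 8 - square / 8).natAbs *
        (PySem.Int.mod t 8 - PySem.Int.mod square 8).natAbs == 2)) = [] := by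
    rw [List.filter_eq_nil_iff]
    intro t ht
    rw [PySem.List.mem_pyRange_one] at ht
    have hdt : PySem.Int.floordiv t 8 = t / 8 :=
      PySem.Int.floordiv_eq_ediv_of_pos (by norm_num)
    simp only [hdt, beq_iff_eq]
    intro heq
    have ha : 3 ≤ (t / 8 - square / 8).natAbs := by omega
    rcases Nat.eq_zero_or_pos ((PySem.Int.mod t 8 - PySem.Int.mod square 8).natAbs) with hb | hb
    · rw [hb, Nat.mul_zero] at heq
      exact absurd heq (by norm_num)
    · have hm := Nat.mul_le_mul ha hb
      omega
  rw [hfil]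
  simp

-- ===== VERDICT (by name: the statement is the Claim_ definition above) =====
theorem knight_attack_mask_spec : Claim_equal_knight_attack_mask := by
  intro square _
  unfold Spec_knight_attack_mask
  by_cases h : -16 ≤ square ∧ square < 80
  · obtain ⟨h1, h2⟩ := h
    interval_cases square <;> decide
  · rw [knight_attack_mask_zero_far square (by omega),
        knight_attack_mask_alt_zero_far square (by omega)]
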